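-- pv_equiv track=rewrite | github.com/pawlowiczf/WDI-2023 | WDI zestaw 4/4 iloraz.py | sumowanie_kolumn
-- ===== SOURCE A (Python) =====
-- def sumowanie_kolumn(tab):
--     suma = 0
--     n = len(tab)
--     suma_kolumn = [0 for i in range(n)]
--
--     for i in range(n):
--         suma = 0
--         for j in range(n):
--             suma += tab[j][i]
--         #end for 2
--         suma_kolumn[i] = suma
--     #end for 1
--
--     return suma_kolumn
-- ===== SOURCE B (Python) =====
-- def sumowanie_kolumn(tab):
--     n = len(tab)
--     sums = [0] * n
--     for row in tab:
--         sums = [sums[i] + row[i] for i in range(n)]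
--     return sums
-- ===== Notes on version B (the rewrite author's own statement) =====
-- stated objective: alternative
-- what changed: Replaces A's column-major double-indexed accumulation into a preallocated slot list by a single row-wise pass that rebuilds a running vector of column sums from each row; Pre_ excludes inputs with a row shorter than len(tab), on which both programs raise IndexError.
import Mathlib
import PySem

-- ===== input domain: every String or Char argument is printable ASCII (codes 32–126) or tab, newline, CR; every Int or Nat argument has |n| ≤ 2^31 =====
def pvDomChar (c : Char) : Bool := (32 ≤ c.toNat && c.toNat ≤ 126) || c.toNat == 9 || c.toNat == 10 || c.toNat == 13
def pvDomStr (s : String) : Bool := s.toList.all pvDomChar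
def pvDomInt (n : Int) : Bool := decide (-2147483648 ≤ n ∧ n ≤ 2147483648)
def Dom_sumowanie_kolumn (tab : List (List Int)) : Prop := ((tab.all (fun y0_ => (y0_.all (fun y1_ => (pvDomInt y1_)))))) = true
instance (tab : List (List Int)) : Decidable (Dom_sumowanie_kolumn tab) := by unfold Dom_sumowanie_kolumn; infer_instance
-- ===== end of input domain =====

-- B replaces A's column-major nested loops by a single row-wise pass folding each row into a running vector of column sums; Pre_ excludes inputs (a row shorter than len(tab)) on which A raises IndexError.


-- ===== PORT A =====
def sumowanie_kolumn (tab : List (List Int)) : List Int :=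
  let n := tab.length
  let suma_kolumn : List Int := (List.range n).map (fun _ => (0 : Int))
  (List.range n).foldl
    (fun acc i =>
      let suma : Int :=
        (List.range n).foldl (fun suma j => suma + ((tab.getD j []).getD i 0)) 0
      acc.set i suma)
    suma_kolumn

-- ===== PORT B =====
def sumowanie_kolumn_alt (tab : List (List Int)) : List Int :=
  let n := tab.length
  tab.foldl (fun sums row => (List.range n).map (fun i => sums.getD i 0 + row.getD i 0))
    (List.replicate n 0)

-- ===== PRECONDITION & SPEC =====
-- Pre_ excludes exactly the inputs where A raises IndexError: a row shorter than len(tab).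
def Pre_sumowanie_kolumn (tab : List (List Int)) : Prop :=
  ∀ row ∈ tab, tab.length ≤ row.length
instance (tab : List (List Int)) : Decidable (Pre_sumowanie_kolumn tab) := by
  unfold Pre_sumowanie_kolumn; infer_instance

def pvWitness_sumowanie_kolumn : List (List Int) := [[1, 2], [3, 4]]

def Spec_sumowanie_kolumn (tab : List (List Int)) (out : List Int) : Prop := out = sumowanie_kolumn_alt tab
instance (tab : List (List Int)) (out : List Int) : Decidable (Spec_sumowanie_kolumn tab out) := by unfold Spec_sumowanie_kolumn; infer_instance

-- ===== CLAIM (what is proved, stated in full; the proofs are below) =====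
def Claim_equal_sumowanie_kolumn : Prop := ∀ (tab : List (List Int)), Dom_sumowanie_kolumn tab → Pre_sumowanie_kolumn tab → Spec_sumowanie_kolumn tab (sumowanie_kolumn tab)

-- ===== LEMMAS AND PROOFS =====

lemma set_append_length {α : Type} :
    ∀ (l1 : List α) (x : α) (rest : List α) (v : α),
      (l1 ++ x :: rest).set l1.length v = l1 ++ v :: rest := by
  intro l1
  induction l1 with
  | nil => intro x rest v; rfl
  | cons a l1 ih => intro x rest v; simp [ih]

-- A's outer loop: setting slot i to f i over range k, starting from a list at least k long,
-- rewrites the first k slots to map f and keeps the rest.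
lemma foldl_set_range (f : Nat → Int) :
    ∀ (k : Nat) (l : List Int), k ≤ l.length →
      (List.range k).foldl (fun a i => a.set i (f i)) l
        = (List.range k).map f ++ l.drop k := by
  intro k
  induction k with
  | zero => intro l _; simp
  | succ k ih =>
    intro l hk
    rw [List.range_succ, List.foldl_append, ih l (Nat.le_of_succ_le hk)]
    simp only [List.foldl_cons, List.foldl_nil]
    have hlen : ((List.range k).map f).length = k := by simp
    have hdrop : l.drop k = l[k]'(by omega) :: l.drop (k + 1) :=
      List.drop_eq_getElem_cons (by omega)
    rw [hdrop, List.map_append]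
    have hset := set_append_length ((List.range k).map f) (l[k]'(by omega)) (l.drop (k + 1)) (f k)
    rw [hlen] at hset
    exact hset.trans (by simp)

-- A's inner loop over indices equals a fold over the rows themselves.
lemma foldl_range_getD (i : Nat) :
    ∀ (l : List (List Int)) (init : Int),
      (List.range l.length).foldl (fun s j => s + ((l.getD j []).getD i 0)) init
        = l.foldl (fun s row => s + row.getD i 0) init := by
  intro l
  induction l with
  | nil => intro init; simp
  | cons x xs ih =>
    intro init
    rw [List.length_cons, List.range_succ_eq_map]
    simp only [List.foldl_cons, List.foldl_map, List.getD_cons_zero, List.getD_cons_succ]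
    exact ih _

-- B's row-wise vector accumulation, characterised pointwise.
lemma foldl_rebuild_char (n : Nat) :
    ∀ (rows : List (List Int)) (acc : List Int), acc.length = n →
      rows.foldl (fun sums row => (List.range n).map (fun i => sums.getD i 0 + row.getD i 0)) acc
        = (List.range n).map
            (fun i => rows.foldl (fun s row => s + row.getD i 0) (acc.getD i 0)) := by
  intro rows
  induction rows with
  | nil =>
    intro acc hlen
    apply List.ext_getElem (by simp [hlen])
    intro i h1 h2
    simp at h2
    simp [List.getElem?_eq_getElem (show i < acc.length by omega)]
  | cons r rs ih =>
    intro acc hlen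
    simp only [List.foldl_cons]
    rw [ih _ (by simp)]
    apply List.map_congr_left
    intro i hi
    rw [List.mem_range] at hi
    congr 1
    rw [List.getD_eq_getElem _ _ (by simpa using hi)]
    simp

-- ===== VERDICT (by name: the statement is the Claim_ definition above) =====
theorem sumowanie_kolumn_spec : Claim_equal_sumowanie_kolumn := by
  intro tab _ hpre
  unfold Spec_sumowanie_kolumn sumowanie_kolumn sumowanie_kolumn_alt
  have hzero : ((List.range tab.length).map (fun _ => (0 : Int))).length = tab.length := by simp
  rw [foldl_set_range _ tab.length _ (by rw [hzero])]
  rw [List.drop_eq_nil_of_le (by rw [hzero]), List.append_nil]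
  rw [foldl_rebuild_char tab.length tab (List.replicate tab.length 0) (by simp)]
  apply List.map_congr_left
  intro i hi
  rw [List.getD_eq_getElem _ _ (by simpa using (List.mem_range.mp hi))]
  simp only [List.getElem_replicate]
  exact foldl_range_getD i tab 0
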